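-- pv_equiv track=rewrite | github.com/rabiakasikci/Find-Mutation-Chances-in-Codon-Table | Find_Mutation_Chances_in_Codon_Table.py | generate_mutation
-- ===== SOURCE A (Python) =====
-- nuc_list=["A","T","G","C"]
--
-- def generate_sequences(matrix):
--     if not matrix:
--         return [""]
--
--     sequences = []
--     current_element = matrix[0]
--
--     for item in current_element if isinstance(current_element, list) else [current_element]:
--         sequences.extend([item + seq for seq in generate_sequences(matrix[1:])])
--
--     return sequences
--
-- new_codon = [[] for _ in range(3)]
--
-- def generate_mutation(codon,mutation_num):
--     new_list=[]
--     if mutation_num==1: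
--         for i in range(3):
--             j = (i + 1) % 3
--             k = (i + 2) % 3
--             new_codon[i] = [eleman for eleman in nuc_list if eleman != codon[i]]
--             new_codon[j] = codon[j]
--             new_codon[k] = codon[k]
--             a=generate_sequences(new_codon)
--             new_list.append(a)
--
--     if mutation_num==2:
--         for i in range(3):
--             j = (i + 1) % 3  # Bu, döngüyü sağlamak için kullanılır
--             k = (i + 2) % 3
--             new_codon[i] = [eleman for eleman in nuc_list if eleman != codon[i]]
--             new_codon[j] = [eleman for eleman in nuc_list if eleman != codon[j]]
--             new_codon[k] = codon[k]
--             a=generate_sequences(new_codon)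
--             new_list.append(a)
--
--     if mutation_num==3:
--         for i in range(1):
--             new_codon[i] = [eleman for eleman in nuc_list if eleman != codon[i]]
--             new_codon[i+1] = [eleman for eleman in nuc_list if eleman != codon[i+1]]
--             new_codon[i+2] = [eleman for eleman in nuc_list if eleman != codon[i+2]]
--             a=generate_sequences(new_codon)
--             new_list.append(a)
--
--     return new_list
-- ===== SOURCE B (Python) =====
-- from itertools import product
--
-- nuc_list = ["A", "T", "G", "C"]
--
-- def generate_mutation(codon, mutation_num):
--     new_list = []
--     if mutation_num == 1:
--         vary_sets = [{i} for i in range(3)]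
--     elif mutation_num == 2:
--         vary_sets = [{i, (i + 1) % 3} for i in range(3)]
--     elif mutation_num == 3:
--         vary_sets = [{0, 1, 2}]
--     else:
--         vary_sets = []
--     for vary in vary_sets:
--         opts = [[n for n in nuc_list if n != codon[p]] if p in vary else [codon[p]]
--                 for p in range(3)]
--         new_list.append([''.join(t) for t in product(*opts)])
--     return new_list
-- ===== Notes on version B (the rewrite author's own statement) =====
-- stated objective: idiomatic
-- what changed: Replaces the global mutable new_codon plus the recursive generate_sequences helper with a single loop over 'varying position' sets that builds three per-position option lists and takes their Cartesian product (itertools.product), eliminating the recursion and the global state.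
import Mathlib
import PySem

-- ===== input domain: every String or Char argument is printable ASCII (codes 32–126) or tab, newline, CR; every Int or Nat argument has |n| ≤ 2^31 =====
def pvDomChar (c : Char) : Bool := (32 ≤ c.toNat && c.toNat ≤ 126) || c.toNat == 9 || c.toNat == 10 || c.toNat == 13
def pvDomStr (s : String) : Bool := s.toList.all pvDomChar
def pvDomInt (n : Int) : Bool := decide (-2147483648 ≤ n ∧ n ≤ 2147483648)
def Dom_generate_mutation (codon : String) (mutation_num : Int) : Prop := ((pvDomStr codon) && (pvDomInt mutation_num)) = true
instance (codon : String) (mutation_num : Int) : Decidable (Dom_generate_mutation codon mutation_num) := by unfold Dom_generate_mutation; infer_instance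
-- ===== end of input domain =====

-- B replaces the global recursive generate_sequences by an itertools.product of per-position
-- option lists driven by a list of "varying position" sets (objective: more idiomatic; same cost).
-- Sequences are modelled as List Char and wrapped with String.ofList at the end (Python str concat = list append).

-- shared module constant nuc_list (1-char Python strings modelled as Char)
def nuc_list : List Char := ['A', 'T', 'G', 'C']

-- codon[i] (1-char string modelled as Char); Pre_ guarantees the index is in range
def cch (codon : String) (i : Int) : Char := (PySem.Str.pyGet? codon i).getD ' '

-- ===== PORT A =====
-- entries of the global new_codon: either a list of 1-char strings or a single 1-char string
inductive PyCell where
  | lst : List Char → PyCell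
  | strv : Char → PyCell
deriving DecidableEq, Repr

def generate_sequences : List PyCell → List (List Char)
  | [] => [[]]
  | cell :: rest =>
    let items : List Char := match cell with | .lst l => l | .strv s => [s]
    items.foldl (fun sequences item =>
      sequences ++ (generate_sequences rest).map (fun seq => item :: seq)) []

def generate_mutation (codon : String) (mutation_num : Int) : List (List String) :=
  -- the global new_codon starts as [[],[],[]]; every iteration overwrites all three slots.
  -- new_codon[x] = v is ported as List.set with .toNat: every index used is from range(3)/range(1),
  -- hence nonnegative and < 3 = len(new_codon), where Python list assignment = List.set (exact here).
  let st0 : List PyCell × List (List (List Char)) := ([.lst [], .lst [], .lst []], [])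
  let step1 := fun (st : List PyCell × List (List (List Char))) (i : Int) =>
    let j := PySem.Int.mod (i + 1) 3
    let k := PySem.Int.mod (i + 2) 3
    let nc := st.1.set i.toNat (.lst (nuc_list.filter (fun eleman => eleman ≠ cch codon i)))
    let nc := nc.set j.toNat (.strv (cch codon j))
    let nc := nc.set k.toNat (.strv (cch codon k))
    (nc, st.2 ++ [generate_sequences nc])
  let step2 := fun (st : List PyCell × List (List (List Char))) (i : Int) =>
    let j := PySem.Int.mod (i + 1) 3
    let k := PySem.Int.mod (i + 2) 3
    let nc := st.1.set i.toNat (.lst (nuc_list.filter (fun eleman => eleman ≠ cch codon i)))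
    let nc := nc.set j.toNat (.lst (nuc_list.filter (fun eleman => eleman ≠ cch codon j)))
    let nc := nc.set k.toNat (.strv (cch codon k))
    (nc, st.2 ++ [generate_sequences nc])
  let step3 := fun (st : List PyCell × List (List (List Char))) (i : Int) =>
    let nc := st.1.set i.toNat (.lst (nuc_list.filter (fun eleman => eleman ≠ cch codon i)))
    let nc := nc.set (i + 1).toNat (.lst (nuc_list.filter (fun eleman => eleman ≠ cch codon (i + 1))))
    let nc := nc.set (i + 2).toNat (.lst (nuc_list.filter (fun eleman => eleman ≠ cch codon (i + 2))))
    (nc, st.2 ++ [generate_sequences nc])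
  let st1 := if mutation_num == 1 then (PySem.List.pyRange 0 3 1).foldl step1 st0 else st0
  let st2 := if mutation_num == 2 then (PySem.List.pyRange 0 3 1).foldl step2 st1 else st1
  let st3 := if mutation_num == 3 then (PySem.List.pyRange 0 1 1).foldl step3 st2 else st2
  st3.2.map (fun g => g.map (fun cs => String.ofList cs))

-- ===== PORT B =====
def generate_mutation_alt (codon : String) (mutation_num : Int) : List (List String) :=
  let vary_sets : List (PySem.Set Int) :=
    if mutation_num == 1 then (PySem.List.pyRange 0 3 1).map (fun i => PySem.Set.ofList [i])
    else if mutation_num == 2 then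
      (PySem.List.pyRange 0 3 1).map (fun i => PySem.Set.ofList [i, PySem.Int.mod (i + 1) 3])
    else if mutation_num == 3 then [PySem.Set.ofList [0, 1, 2]]
    else []
  (vary_sets.foldl (fun new_list vary =>
    let opts : List (List Char) := (PySem.List.pyRange 0 3 1).map (fun p =>
      if PySem.Set.contains vary p then nuc_list.filter (fun n => n ≠ cch codon p)
      else [cch codon p])
    let prods : List (List Char) :=
      match opts with
      | [o0, o1, o2] => o0.flatMap (fun x => o1.flatMap (fun y => o2.map (fun z => [x, y, z])))
      | _ => []
    new_list ++ [prods]) []).map (fun g => g.map (fun cs => String.ofList cs))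

-- ===== PRECONDITION & SPEC =====
-- Pre_ excludes exactly the inputs where A raises IndexError: mutation_num in {1,2,3} with a codon shorter than 3.
def Pre_generate_mutation (codon : String) (mutation_num : Int) : Prop :=
  (mutation_num = 1 ∨ mutation_num = 2 ∨ mutation_num = 3) → 3 ≤ codon.toList.length
instance (codon : String) (mutation_num : Int) : Decidable (Pre_generate_mutation codon mutation_num) := by
  unfold Pre_generate_mutation; infer_instance
def pvWitness_generate_mutation : String × Int := ("ATG", 1)

def Spec_generate_mutation (codon : String) (mutation_num : Int) (out : List (List String)) : Prop := out = generate_mutation_alt codon mutation_num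
instance (codon : String) (mutation_num : Int) (out : List (List String)) : Decidable (Spec_generate_mutation codon mutation_num out) := by unfold Spec_generate_mutation; infer_instance

-- ===== CLAIM (what is proved, stated in full; the proofs are below) =====
def Claim_equal_generate_mutation : Prop := ∀ (codon : String) (mutation_num : Int), Dom_generate_mutation codon mutation_num → Pre_generate_mutation codon mutation_num → Spec_generate_mutation codon mutation_num (generate_mutation codon mutation_num)

-- ===== LEMMAS AND PROOFS =====

theorem flatten_map_singleton {α β : Type} (l : List α) (g : α → β) :
    (l.map (fun x => [g x])).flatten = l.map g := by
  induction l <;> simp_all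

theorem gm_eq_one (codon : String) : generate_mutation codon 1 = generate_mutation_alt codon 1 := by
  have hr3 : PySem.List.pyRange 0 3 1 = [0,1,2] := by decide
  simp [generate_mutation, generate_mutation_alt, hr3, generate_sequences,
    flatten_map_singleton, List.flatMap_def, Function.comp_def]

theorem gm_eq_two (codon : String) : generate_mutation codon 2 = generate_mutation_alt codon 2 := by
  have hr3 : PySem.List.pyRange 0 3 1 = [0,1,2] := by decide
  simp [generate_mutation, generate_mutation_alt, hr3, generate_sequences,
    flatten_map_singleton, List.flatMap_def, Function.comp_def]
  rfl

theorem gm_eq_three (codon : String) : generate_mutation codon 3 = generate_mutation_alt codon 3 := by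
  have hr3 : PySem.List.pyRange 0 3 1 = [0,1,2] := by decide
  have hr1 : PySem.List.pyRange 0 1 1 = [0] := by decide
  simp [generate_mutation, generate_mutation_alt, hr3, hr1, generate_sequences,
    flatten_map_singleton, List.flatMap_def, Function.comp_def]

theorem gm_eq_other (codon : String) (m : Int) (h1 : m ≠ 1) (h2 : m ≠ 2) (h3 : m ≠ 3) :
    generate_mutation codon m = generate_mutation_alt codon m := by
  simp [generate_mutation, generate_mutation_alt, h1, h2, h3]

-- ===== VERDICT (by name: the statement is the Claim_ definition above) =====
theorem generate_mutation_spec : Claim_equal_generate_mutation := by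
  intro codon m _ _
  unfold Spec_generate_mutation
  by_cases h1 : m = 1
  · subst h1; exact gm_eq_one codon
  by_cases h2 : m = 2
  · subst h2; exact gm_eq_two codon
  by_cases h3 : m = 3
  · subst h3; exact gm_eq_three codon
  exact gm_eq_other codon m h1 h2 h3
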